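-- pv_equiv track=rewrite | github.com/tdda/tdda | rexpy/rexpy.py | right_parts
-- ===== SOURCE A (Python) =====
-- from collections import Counter, defaultdict, namedtuple
--
-- def right_parts(patterns, fixed):
--     """
--     patterns is a list of patterns each consisting of a list of frags.
--
--     fixed is a list of (fragment, pos) pairs where position specifies
--     the position from the right, i.e a position that can be indexed as
--     -position. Fixed should be sorted, increasing on position, i.e.
--     sorted from the right-most pattern.
--     The positions specify points at which to split the patterns.
--
--     This function returns a list of lists of pattern fragments,
--     split at each fixed position.
--     """
--     if not fixed:
--         return [patterns]
--     out = []
--     lstats = length_stats(patterns)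
--     lastPos = -lstats.max_length  # will be reversed in use
--     for (frag, pos) in fixed:
--         if pos > 1:  # Nothing the right if it's position -1
--             out.append([p[-pos + 1:-lastPos] for p in patterns])
--         out.append([[p[-pos]] for p in patterns])  # the fixed bit
--         lastPos = pos
--     if lastPos < lstats.max_length:  # the start, if there's anything left
--         out.append([p[:-lastPos] for p in patterns])
--     out.reverse()  # We built it up from the right; so we must reverse it
--     return out
--
-- def length_stats(patterns):
--     """
--     Given a list of patterns, returns named tuple containing
--
--         all_same_length: boolean, True if all patterns are the same length
--         max_length:      length of the longest pattern in patterns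
--     """
--     lengths = [len(p) for p in patterns]
--     L0 = lengths[0] if lengths else 0
--     LS = namedtuple('lengthstats', 'all_same_length max_length')
--     return LS(all(L == L0 for L in lengths), max(lengths) if lengths else 0)
-- ===== SOURCE B (Python) =====
-- def segment(p, spec):
--     """Apply one slice/fixed-cell descriptor to a single pattern."""
--     if spec[0] == 'fixed':
--         return [p[spec[1]]]
--     return p[spec[1]:spec[2]]
--
--
-- def right_parts(patterns, fixed):
--     """Compute the column descriptors once, then segment each pattern row-wise
--     and transpose the rows into the output columns."""
--     if not fixed:
--         return [patterns]
--     max_length = max((len(p) for p in patterns), default=0)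
--     positions = [pos for _, pos in fixed]
--     rev = positions[::-1]
--     specs = []
--     if positions[-1] < max_length:
--         specs.append(('slice', None, -positions[-1]))
--     for pos, nxt in zip(rev, rev[1:] + [-max_length]):
--         specs.append(('fixed', -pos))
--         if pos > 1:
--             specs.append(('slice', -pos + 1, -nxt))
--     rows = [[segment(p, spec) for spec in specs] for p in patterns]
--     return [[row[j] for row in rows] for j in range(len(specs))]
-- ===== Notes on version B (the rewrite author's own statement) =====
-- stated objective: alternative
-- what changed: B first computes a list of column descriptors (slice/fixed-cell specs) from the positions alone, then segments each pattern row-wise into its full list of fragments, and finally transposes the rows into the output columns; A instead accumulates whole columns right-to-left over the fixed list and reverses at the end.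
import Mathlib
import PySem

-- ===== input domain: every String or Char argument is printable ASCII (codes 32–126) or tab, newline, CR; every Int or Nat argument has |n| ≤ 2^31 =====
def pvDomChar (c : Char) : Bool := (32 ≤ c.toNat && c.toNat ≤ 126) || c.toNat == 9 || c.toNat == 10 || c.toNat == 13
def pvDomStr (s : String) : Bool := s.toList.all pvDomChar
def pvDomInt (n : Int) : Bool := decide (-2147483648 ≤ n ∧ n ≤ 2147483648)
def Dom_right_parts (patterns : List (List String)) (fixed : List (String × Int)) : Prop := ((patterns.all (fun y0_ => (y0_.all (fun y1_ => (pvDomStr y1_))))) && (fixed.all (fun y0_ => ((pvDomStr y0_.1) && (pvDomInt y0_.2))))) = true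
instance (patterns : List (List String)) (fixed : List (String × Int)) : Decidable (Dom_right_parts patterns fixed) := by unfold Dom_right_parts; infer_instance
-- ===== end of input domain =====

-- B computes a column-descriptor list from the positions, segments each pattern row-wise,
-- and transposes rows into columns, replacing A's right-to-left column accumulation + reverse.
-- Objective: alternative (same cost, different construction).

-- ===== PORT A =====
-- port of length_stats: (all_same_length, max_length)
def pvLengthStats (patterns : List (List String)) : Bool × Int :=
  let lengths : List Int := patterns.map (fun p => (p.length : Int))
  let L0 : Int := lengths.headD 0
  (lengths.all (fun L => L == L0),
   if lengths = [] then 0 else (PySem.List.max? lengths (fun x => x)).getD 0)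

def right_parts (patterns : List (List String)) (fixed : List (String × Int)) : List (List (List String)) :=
  if fixed = [] then [patterns]
  else
    let lstats := pvLengthStats patterns
    let st := fixed.foldl
      (fun (st : List (List (List String)) × Int) fp =>
        let pos := fp.2
        let out := if pos > 1
          then st.1 ++ [patterns.map (fun p => PySem.List.slice p (some (-pos + 1)) (some (-st.2)))]
          else st.1
        -- p[-pos]: pyGetD is exact under Pre_ (index in range; Python raises IndexError outside it)
        let out := out ++ [patterns.map (fun p => [PySem.List.pyGetD p (-pos) ""])]
        (out, pos))
      ([], -lstats.2)
    let out := if st.2 < lstats.2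
      then st.1 ++ [patterns.map (fun p => PySem.List.slice p none (some (-st.2)))]
      else st.1
    out.reverse

-- ===== PORT B =====
-- a column descriptor: either a slice p[a:b] or a fixed cell [p[i]] (Source B's ('slice',a,b)/('fixed',i))
inductive PvSpec
  | sl : Option Int → Int → PvSpec
  | fx : Int → PvSpec
deriving DecidableEq, Repr

-- Source B's segment(p, spec)
def pvSegment (p : List String) : PvSpec → List String
  | .fx i => [PySem.List.pyGetD p i ""]   -- exact under Pre_ (index in range)
  | .sl a b => PySem.List.slice p a (some b)

-- Source B's spec-building loop over zip(rev, rev[1:] + [-max_length])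
def pvSpecsLoop : List (Int × Int) → List PvSpec
  | [] => []
  | (pos, nxt) :: rest =>
      .fx (-pos) :: ((if pos > 1 then [PvSpec.sl (some (-pos + 1)) (-nxt)] else []) ++ pvSpecsLoop rest)

def right_parts_alt (patterns : List (List String)) (fixed : List (String × Int)) : List (List (List String)) :=
  if fixed = [] then [patterns]
  else
    let maxLen : Int := PySem.List.maxD (patterns.map (fun p => (p.length : Int))) (fun x => x) 0
    let positions : List Int := fixed.map (fun fp => fp.2)
    let rev := positions.reverse
    let top : Int := PySem.List.pyGetD positions (-1) 0    -- positions[-1]; positions ≠ [] here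
    let specs : List PvSpec :=
      (if top < maxLen then [PvSpec.sl none (-top)] else []) ++
      pvSpecsLoop (rev.zip (rev.tail ++ [-maxLen]))
    let rows := patterns.map (fun p => specs.map (pvSegment p))
    (List.range specs.length).map (fun (j : Nat) => rows.map (fun row => PySem.List.pyGetD row ((j : Int)) []))

-- ===== PRECONDITION & SPEC =====
-- Pre_ excludes exactly the inputs where A raises IndexError: p[-pos] must be in range
-- for every pattern p and every fixed position pos.
def Pre_right_parts (patterns : List (List String)) (fixed : List (String × Int)) : Prop :=
  ∀ fp ∈ fixed, ∀ p ∈ patterns, PySem.Raise.InRange p.length (-fp.2)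
instance (patterns : List (List String)) (fixed : List (String × Int)) : Decidable (Pre_right_parts patterns fixed) := by unfold Pre_right_parts; infer_instance

def pvWitness_right_parts : List (List String) × (List (String × Int)) :=
  ([["a", "b", "c"], ["x", "y", "z", "w"]], [("f", 1), ("g", 3)])

def Spec_right_parts (patterns : List (List String)) (fixed : List (String × Int)) (out : List (List (List String))) : Prop := out = right_parts_alt patterns fixed
instance (patterns : List (List String)) (fixed : List (String × Int)) (out : List (List (List String))) : Decidable (Spec_right_parts patterns fixed out) := by unfold Spec_right_parts; infer_instance

-- ===== CLAIM (what is proved, stated in full; the proofs are below) =====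
def Claim_equal_right_parts : Prop := ∀ (patterns : List (List String)) (fixed : List (String × Int)), Dom_right_parts patterns fixed → Pre_right_parts patterns fixed → Spec_right_parts patterns fixed (right_parts patterns fixed)

-- ===== LEMMAS AND PROOFS =====

-- one output column for a descriptor
def pvCol (patterns : List (List String)) (s : PvSpec) : List (List String) :=
  patterns.map (fun p => pvSegment p s)

-- A's loop output in emission (right-to-left) order, recursively
def pvHA (patterns : List (List String)) : List (String × Int) → Int → List (List (List String))
  | [], _ => []
  | (_, pos) :: rest, last =>
      (if pos > 1
        then [patterns.map (fun p => PySem.List.slice p (some (-pos + 1)) (some (-last)))]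
        else []) ++
      (patterns.map (fun p => [PySem.List.pyGetD p (-pos) ""])) ::
      pvHA patterns rest pos

-- the second loop-state component: the last position seen
def pvLastPos : List (String × Int) → Int → Int
  | [], last => last
  | (_, pos) :: rest, _ => pvLastPos rest pos

lemma pvFoldl_eq (patterns : List (List String)) :
    ∀ (fs : List (String × Int)) (acc : List (List (List String))) (last : Int),
      fs.foldl
        (fun (st : List (List (List String)) × Int) fp =>
          let pos := fp.2
          let out := if pos > 1
            then st.1 ++ [patterns.map (fun p => PySem.List.slice p (some (-pos + 1)) (some (-st.2)))]
            else st.1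
          let out := out ++ [patterns.map (fun p => [PySem.List.pyGetD p (-pos) ""])]
          (out, pos)) (acc, last)
      = (acc ++ pvHA patterns fs last, pvLastPos fs last) := by
  intro fs
  induction fs with
  | nil => intro acc last; simp [pvHA, pvLastPos]
  | cons fp rest ih =>
      intro acc last
      obtain ⟨f, pos⟩ := fp
      simp only [List.foldl_cons, pvHA, pvLastPos, ih]
      split_ifs with h <;> simp

lemma pvSpecsLoop_append (a b : List (Int × Int)) :
    pvSpecsLoop (a ++ b) = pvSpecsLoop a ++ pvSpecsLoop b := by
  induction a with
  | nil => simp [pvSpecsLoop]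
  | cons x xs ih =>
      obtain ⟨pos, nxt⟩ := x
      simp [pvSpecsLoop, ih]

lemma pv_zip_concat {A B : Type} (l1 : List A) (l2 : List B) (x : A) (y : B)
    (h : l1.length = l2.length) :
    (l1 ++ [x]).zip (l2 ++ [y]) = l1.zip l2 ++ [(x, y)] := by
  rw [List.zip_append h]; rfl

lemma pvSpecsLoop_single (pos nxt : Int) :
    pvSpecsLoop [(pos, nxt)]
      = PvSpec.fx (-pos) :: (if pos > 1 then [PvSpec.sl (some (-pos + 1)) (-nxt)] else []) := by
  simp [pvSpecsLoop]

lemma pv_rev_hA (patterns : List (List String)) :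
    ∀ (fs : List (String × Int)) (last : Int),
      (pvHA patterns fs last).reverse
        = (pvSpecsLoop
            (((fs.map (fun fp => fp.2)).reverse).zip
              (((fs.map (fun fp => fp.2)).reverse.tail) ++ [-(-last)] ))).map (pvCol patterns) := by
  intro fs
  induction fs with
  | nil => intro last; simp [pvHA, pvSpecsLoop]
  | cons fp rest ih =>
      intro last
      obtain ⟨f, pos⟩ := fp
      cases rest with
      | nil =>
          simp only [pvHA, List.map_cons, List.map_nil, List.reverse_cons, List.reverse_nil,
            List.nil_append, List.tail_cons, List.zip_cons_cons, List.zip_nil_right, pvSpecsLoop]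
          split_ifs with h <;> simp [pvCol, pvSegment]
      | cons r rs =>
          obtain ⟨R0, Rs, hR⟩ := List.exists_cons_of_ne_nil
            (by simp : ((r :: rs).map (fun fp => fp.2)).reverse ≠ [])
          have hstep : (pvHA patterns ((f, pos) :: r :: rs) last).reverse
              = (pvHA patterns (r :: rs) pos).reverse
                ++ ((patterns.map (fun p => [PySem.List.pyGetD p (-pos) ""])) ::
                   (if pos > 1
                    then [patterns.map (fun p => PySem.List.slice p (some (-pos + 1)) (some (-last)))]
                    else [])) := by
            simp only [pvHA]; split_ifs with h <;> simp
          have hrev : (((f, pos) :: r :: rs).map (fun fp => fp.2)).reverse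
              = (R0 :: Rs) ++ [pos] := by
            rw [List.map_cons, List.reverse_cons, hR]
          rw [hstep, ih pos, hR, hrev]
          have h2 : ((R0 :: Rs) ++ [pos]).tail ++ [-(-last)]
              = (Rs ++ [pos]) ++ [-(-last)] := by simp
          rw [h2, pv_zip_concat _ _ _ _ (by simp), pvSpecsLoop_append]
          simp only [List.map_append, List.tail_cons]
          congr 1
          · simp only [neg_neg]
          · rw [pvSpecsLoop_single]
            split_ifs with h <;> simp [pvCol, pvSegment]

lemma pv_lastPos_head (fs : List (String × Int)) (last : Int) (h : fs ≠ []) :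
    pvLastPos fs last = PySem.List.pyGetD (fs.map (fun fp => fp.2)) (-1) 0 := by
  induction fs generalizing last with
  | nil => exact absurd rfl h
  | cons fp rest ih =>
      obtain ⟨f, pos⟩ := fp
      cases rest with
      | nil => simp [pvLastPos, PySem.List.pyGetD_neg_one]
      | cons r rs =>
          rw [show pvLastPos ((f, pos) :: r :: rs) last = pvLastPos (r :: rs) pos from rfl,
              ih pos (by simp)]
          have hne : (r :: rs).map (fun fp => fp.2) ≠ [] := by simp
          obtain ⟨hd, tl, hH⟩ := List.exists_cons_of_ne_nil hne
          rw [show (((f, pos) :: r :: rs).map (fun fp => fp.2)) = pos :: (r :: rs).map (fun fp => fp.2) from rfl, hH]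
          rw [PySem.List.pyGetD_neg_one (hd :: tl) 0 (by simp),
              PySem.List.pyGetD_neg_one (pos :: hd :: tl) 0 (by simp)]
          simp [List.getLast_cons]

lemma pv_max_eq (patterns : List (List String)) :
    (pvLengthStats patterns).2
      = PySem.List.maxD (patterns.map (fun p => (p.length : Int))) (fun x => x) 0 := by
  cases patterns with
  | nil => simp [pvLengthStats, PySem.List.maxD, PySem.List.max?]
  | cons p ps => simp [pvLengthStats, PySem.List.maxD]

-- the transpose step of B: indexing the rows at each j < |specs| yields the columns
lemma pv_transpose (patterns : List (List String)) (specs : List PvSpec) :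
    (List.range specs.length).map
        (fun (j : Nat) => (patterns.map (fun p => specs.map (pvSegment p))).map
          (fun row => PySem.List.pyGetD row ((j : Int)) []))
      = specs.map (pvCol patterns) := by
  apply List.ext_getElem
  · simp
  · intro j h1 h2
    have hj : j < specs.length := by simpa using h2
    simp only [List.getElem_map, List.getElem_range, List.map_map]
    unfold pvCol
    apply List.map_congr_left
    intro p _
    simp only [Function.comp_apply, PySem.List.pyGetD_natCast]
    rw [List.getD_eq_getElem _ _ (by simpa using hj)]
    simp

-- ===== VERDICT (by name: the statement is the Claim_ definition above) =====
theorem right_parts_spec : Claim_equal_right_parts := by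
  intro patterns fixed _ _
  unfold Spec_right_parts right_parts right_parts_alt
  by_cases hfix : fixed = []
  · simp [hfix]
  · simp only [hfix, ite_false]
    rw [pvFoldl_eq, pv_transpose, ← pv_max_eq patterns]
    rw [pv_lastPos_head fixed _ hfix]
    simp only [List.map_append]
    split_ifs with h
    · rw [List.reverse_append]
      simp only [List.reverse_cons, List.reverse_nil, List.nil_append]
      rw [pv_rev_hA]
      simp [pvCol, pvSegment]
    · simp only [List.nil_append]
      rw [pv_rev_hA]
      simp
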